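-- pv_equiv track=rewrite | github.com/hajin-kim/2019-1-Yonsei-Univ.-CSI2100-Computer-Programming | Lab solutions/Lab08/lab8_p2.py | removeValuesInPlace
-- ===== SOURCE A (Python) =====
-- def removeValuesInPlace(L, threshold):
--     """
--     Remove values
--     :param L: The given list(input)
--     :param threshold: If a value is bigger than threshold, that value is removed
--     :return: List L(mutated)
--     """
--     i = 0
--
--     while i < len(L):
--         if L[i] > threshold:
--             del L[i]    # Cause mutation
--         else:
--             i += 1
--
--     return L
-- ===== SOURCE B (Python) =====
-- def removeValuesInPlace(L, threshold):
--     # Single-pass write-pointer compaction: keep elements <= threshold, in place.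
--     w = 0
--     for x in L:
--         if x <= threshold:
--             L[w] = x
--             w += 1
--     del L[w:]
--     return L
-- ===== Notes on version B (the rewrite author's own statement) =====
-- stated objective: faster
-- what changed: Replaced the while-loop that repeatedly deletes from the middle of the list (each del shifting the tail) with a single-pass write-pointer compaction that copies kept elements forward and truncates once.
import Mathlib
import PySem

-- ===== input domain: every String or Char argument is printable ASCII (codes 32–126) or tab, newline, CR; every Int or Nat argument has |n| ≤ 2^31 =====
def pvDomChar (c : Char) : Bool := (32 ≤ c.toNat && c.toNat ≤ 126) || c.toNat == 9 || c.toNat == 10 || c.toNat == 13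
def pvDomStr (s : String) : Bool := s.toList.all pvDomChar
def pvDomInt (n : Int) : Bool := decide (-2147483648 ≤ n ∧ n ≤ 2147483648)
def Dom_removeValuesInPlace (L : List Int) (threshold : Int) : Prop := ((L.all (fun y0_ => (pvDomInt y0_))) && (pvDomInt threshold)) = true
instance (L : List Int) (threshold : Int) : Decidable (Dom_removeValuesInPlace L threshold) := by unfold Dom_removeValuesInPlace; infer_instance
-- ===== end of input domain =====

-- ===== PORT A =====
-- B replaces A's quadratic delete-in-the-middle while-loop with a single-pass
-- write-pointer compaction (objective: faster). Equivalence is about the return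
-- value; both Pythons mutate L in place (to the same final contents).
-- A's while loop: state (L, i); each step either deletes L[i] or advances i.
def removeValuesInPlaceLoop (L : List Int) (threshold : Int) (i : Nat) : List Int :=
  if h : i < L.length then
    if L[i] > threshold then
      removeValuesInPlaceLoop (L.eraseIdx i) threshold i
    else
      removeValuesInPlaceLoop L threshold (i + 1)
  else L
termination_by L.length - i
decreasing_by
  · simp [List.length_eraseIdx, h]; omega
  · omega

def removeValuesInPlace (L : List Int) (threshold : Int) : List Int :=
  removeValuesInPlaceLoop L threshold 0

-- ===== PORT B =====
-- for x in L: if x <= threshold, write it at the next kept slot; the kept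
-- prefix is modelled as the accumulator, final truncation returns it.
def removeValuesInPlace_alt (L : List Int) (threshold : Int) : List Int :=
  L.foldl (fun kept x => if x ≤ threshold then kept ++ [x] else kept) []

-- ===== PRECONDITION & SPEC =====
def Spec_removeValuesInPlace (L : List Int) (threshold : Int) (out : List Int) : Prop := out = removeValuesInPlace_alt L threshold
instance (L : List Int) (threshold : Int) (out : List Int) : Decidable (Spec_removeValuesInPlace L threshold out) := by unfold Spec_removeValuesInPlace; infer_instance

-- ===== CLAIM (what is proved, stated in full; the proofs are below) =====
def Claim_equal_removeValuesInPlace : Prop := ∀ (L : List Int) (threshold : Int), Dom_removeValuesInPlace L threshold → Spec_removeValuesInPlace L threshold (removeValuesInPlace L threshold)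

-- ===== LEMMAS AND PROOFS =====

-- A's loop invariant: it leaves the first i elements alone and filters the rest.
theorem removeValuesInPlaceLoop_eq (L : List Int) (threshold : Int) (i : Nat) :
    removeValuesInPlaceLoop L threshold i
      = L.take i ++ (L.drop i).filter (fun x => decide (x ≤ threshold)) := by
  induction L, i using removeValuesInPlaceLoop.induct (threshold := threshold) with
  | case1 L i h hgt ih =>
    rw [removeValuesInPlaceLoop]
    simp only [h, dif_pos, hgt, if_pos, ih]
    have htake : (L.eraseIdx i).take i = L.take i := by
      rw [List.eraseIdx_eq_take_drop_succ]
      rw [List.take_append_of_le_length (by simp [Nat.le_of_lt h])]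
      simp
    have hdrop : (L.eraseIdx i).drop i = L.drop (i + 1) := by
      rw [List.eraseIdx_eq_take_drop_succ]
      rw [List.drop_append_of_le_length (by simp [Nat.le_of_lt h])]
      simp
    rw [htake, hdrop]
    have hd : L.drop i = L[i] :: L.drop (i + 1) := List.drop_eq_getElem_cons h
    rw [hd, List.filter_cons]
    simp [Int.not_le.mpr hgt]
  | case2 L i h hle ih =>
    rw [removeValuesInPlaceLoop]
    simp only [h, dif_pos, hle, ih]
    have hd : L.drop i = L[i] :: L.drop (i + 1) := List.drop_eq_getElem_cons h
    have ht : L.take (i + 1) = L.take i ++ [L[i]] := List.take_succ_eq_append_getElem h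
    rw [ht, hd, List.filter_cons]
    simp [Int.not_lt.mp hle]
    rw [ht, List.append_assoc]
    simp
  | case3 L i h =>
    rw [removeValuesInPlaceLoop]
    have hle : L.length ≤ i := Nat.le_of_not_lt h
    simp [h, List.take_of_length_le hle, List.drop_of_length_le hle]

-- B's fold accumulates exactly the filtered list.
theorem foldl_keep_eq (L : List Int) (threshold : Int) (acc : List Int) :
    L.foldl (fun kept x => if x ≤ threshold then kept ++ [x] else kept) acc
      = acc ++ L.filter (fun x => decide (x ≤ threshold)) := by
  induction L generalizing acc with
  | nil => simp
  | cons x xs ih =>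
    simp only [List.foldl_cons, List.filter_cons]
    by_cases hx : x ≤ threshold
    · simp [hx, ih]
    · simp [hx, ih]

-- ===== VERDICT (by name: the statement is the Claim_ definition above) =====
theorem removeValuesInPlace_spec : Claim_equal_removeValuesInPlace := by
  intro L threshold _
  unfold Spec_removeValuesInPlace removeValuesInPlace removeValuesInPlace_alt
  rw [removeValuesInPlaceLoop_eq, foldl_keep_eq]
  simp
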